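-- pv_equiv track=rewrite | github.com/Fozil767/Python | lesson-13/homework/hw13.py | find_word_occurrences
-- ===== SOURCE A (Python) =====
-- def find_word_occurrences(text, word):
--     word = word.lower()
--     text_lower = text.lower()
--     index = 0
--     positions = []
--
--     while index < len(text_lower):
--         index = text_lower.find(word, index)
--         if index == -1:
--             break
--         positions.append(index)
--         index += len(word)
--
--     return positions
-- ===== SOURCE B (Python) =====
-- def find_word_occurrences(text, word):
--     t = text.lower()
--     w = word.lower()
--     m = len(w)
--     # phase 1: every (possibly overlapping) match position
--     hits = [i for i in range(len(t)) if t[i:i+m] == w]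
--     # phase 2: greedy left-to-right selection of non-overlapping matches
--     positions = []
--     bound = 0
--     for p in hits:
--         if p >= bound:
--             positions.append(p)
--             bound = p + m
--     return positions
-- ===== Notes on version B (the rewrite author's own statement) =====
-- stated objective: alternative
-- what changed: Replaces A's single find-and-skip while loop by two staged passes: first a comprehension enumerating every (possibly overlapping) slice-match position, then a greedy fold that keeps a position only when it starts at or after the end of the previously kept match.
import Mathlib
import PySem

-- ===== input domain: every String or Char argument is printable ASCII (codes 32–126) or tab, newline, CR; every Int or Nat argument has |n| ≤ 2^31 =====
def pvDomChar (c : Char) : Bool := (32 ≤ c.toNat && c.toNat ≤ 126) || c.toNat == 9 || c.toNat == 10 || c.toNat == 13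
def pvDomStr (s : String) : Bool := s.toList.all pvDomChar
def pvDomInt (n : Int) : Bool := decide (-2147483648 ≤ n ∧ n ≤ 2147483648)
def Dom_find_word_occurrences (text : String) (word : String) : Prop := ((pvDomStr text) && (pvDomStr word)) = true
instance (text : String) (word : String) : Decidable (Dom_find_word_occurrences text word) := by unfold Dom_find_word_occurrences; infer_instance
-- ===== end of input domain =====

-- B replaces A's find-and-skip while loop by two staged passes: enumerate all
-- (overlapping) match positions, then greedily keep the non-overlapping ones
-- (alternative decomposition, same cost class).

-- ===== PORT A =====
-- A's while loop: index = text_lower.find(word, index); one fuel unit per iteration,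
-- fuel = len(text)+1 is always enough where A terminates (Pre_ below excludes A's
-- empty-word divergence, where the while loop never ends).
def goA (t w : List Char) : Nat → Int → List Int → List Int
  | 0, _, positions => positions
  | fuel + 1, index, positions =>
    if index < (t.length : Int) then
      let j := PySem.Chars.findFrom t w index none
      if j = -1 then positions
      else goA t w fuel (j + (w.length : Int)) (positions ++ [j])
    else positions

def find_word_occurrences (text : String) (word : String) : List Int :=
  let w := PySem.Chars.lower word.toList
  let t := PySem.Chars.lower text.toList
  goA t w (t.length + 1) 0 []

-- ===== PORT B =====
-- phase 2's loop: for p in hits: if p >= bound: append p; bound = p + m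
def goGreedy (m : Nat) : List Nat → Nat → List Int → List Int
  | [], _, positions => positions
  | p :: rest, bound, positions =>
    if bound ≤ p then goGreedy m rest (p + m) (positions ++ [(p : Int)])
    else goGreedy m rest bound positions

def find_word_occurrences_alt (text : String) (word : String) : List Int :=
  let t := PySem.Chars.lower text.toList
  let w := PySem.Chars.lower word.toList
  let m := w.length
  -- phase 1: [i for i in range(len(t)) if t[i:i+m] == w];
  -- the slice t[i:i+m] with 0 ≤ i < len(t) and m ≥ 0 is exactly (t.drop i).take m
  let hits := (List.range t.length).filter (fun i => (t.drop i).take m == w)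
  goGreedy m hits 0 []

-- ===== PRECONDITION & SPEC =====
-- A loops forever when word = "" and text ≠ "" (find('', i) = i and i += 0);
-- Pre_ excludes exactly those diverging inputs — A returns everywhere Pre_ admits.
def Pre_find_word_occurrences (text : String) (word : String) : Prop :=
  word.toList ≠ [] ∨ text.toList = []
instance (text : String) (word : String) : Decidable (Pre_find_word_occurrences text word) := by
  unfold Pre_find_word_occurrences; infer_instance

def pvWitness_find_word_occurrences : String × String := ("Hello hello world", "hello")

def Spec_find_word_occurrences (text : String) (word : String) (out : List Int) : Prop := out = find_word_occurrences_alt text word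
instance (text : String) (word : String) (out : List Int) : Decidable (Spec_find_word_occurrences text word out) := by unfold Spec_find_word_occurrences; infer_instance

-- ===== CLAIM (what is proved, stated in full; the proofs are below) =====
def Claim_equal_find_word_occurrences : Prop := ∀ (text : String) (word : String), Dom_find_word_occurrences text word → Pre_find_word_occurrences text word → Spec_find_word_occurrences text word (find_word_occurrences text word)

-- ===== LEMMAS AND PROOFS =====

-- intermediate loop used only by the proof: the naive scan that checks every index
-- and skips len(word) on a hit; it bridges A's find-driven loop and B's two passes
def scanC (t w : List Char) : Nat → Nat → List Int → List Int
  | 0, _, positions => positions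
  | fuel + 1, i, positions =>
    if i < t.length then
      if PySem.Chars.startswith (t.drop i) w then
        scanC t w fuel (i + w.length) (positions ++ [(i : Int)])
      else scanC t w fuel (i + 1) positions
    else positions

-- find on the empty text is -1 for a nonempty pattern
theorem find_nil_of_ne (w : List Char) (hw : w ≠ []) : PySem.Chars.find [] w = -1 := by
  rw [PySem.Chars.find_eq_neg_one_iff]
  intro h
  exact hw (List.eq_nil_of_infix_nil h)

-- a hit at i: findFrom returns i itself
theorem findFrom_self (t w : List Char) (i : Nat) (hi : i ≤ t.length)
    (h : w <+: t.drop i) : PySem.Chars.findFrom t w (i : Int) none = (i : Int) := by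
  rw [PySem.Chars.findFrom_natCast t w i hi]
  have hf0 : PySem.Chars.find (t.drop i) w = 0 := by
    have hnn : 0 ≤ PySem.Chars.find (t.drop i) w := by
      rw [PySem.Chars.find_nonneg_iff]; exact h.isInfix
    have hspec := PySem.Chars.find_spec hnn
    by_contra hne
    have hpos : 0 < (PySem.Chars.find (t.drop i) w).toNat := by omega
    exact hspec.2 0 hpos (by simpa using h)
  simp [hf0]

-- no hit at i: findFrom from i equals findFrom from i+1
theorem findFrom_step (t w : List Char) (i : Nat) (hi : i < t.length)
    (h : ¬ w <+: t.drop i) :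
    PySem.Chars.findFrom t w (i : Int) none = PySem.Chars.findFrom t w ((i + 1 : Nat) : Int) none := by
  rw [PySem.Chars.findFrom_natCast t w i (le_of_lt hi),
      PySem.Chars.findFrom_natCast t w (i + 1) hi]
  have hdrop : ∀ k : Nat, (t.drop (i + 1)).drop k = (t.drop i).drop (1 + k) := by
    intro k; rw [List.drop_drop, List.drop_drop]; ring_nf
  by_cases h1 : PySem.Chars.find (t.drop (i + 1)) w = -1
  · have h0 : PySem.Chars.find (t.drop i) w = -1 := by
      by_contra hne
      have hnn : 0 ≤ PySem.Chars.find (t.drop i) w := by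
        have := PySem.Chars.neg_one_le_find (t.drop i) w; omega
      have hspec := PySem.Chars.find_spec hnn
      rcases Nat.eq_zero_or_pos (PySem.Chars.find (t.drop i) w).toNat with h00 | hpos
      · exact h (by simpa [h00] using hspec.1)
      · obtain ⟨k, hk⟩ : ∃ k, (PySem.Chars.find (t.drop i) w).toNat = 1 + k :=
          ⟨(PySem.Chars.find (t.drop i) w).toNat - 1, by omega⟩
        have : w <+: (t.drop (i + 1)).drop k := by rw [hdrop]; simpa [hk] using hspec.1
        have : w <:+: t.drop (i + 1) :=
          ((PySem.Chars.isIn_iff_infix w (t.drop (i+1))).1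
            ((PySem.Chars.exists_prefix_drop_iff_isIn w (t.drop (i+1))).1 ⟨k, this⟩))
        rw [PySem.Chars.find_eq_neg_one_iff] at h1; exact h1 this
    simp [h0, h1]
  · -- there is a hit from i+1 on; find from i is exactly one later
    have hfnn : 0 ≤ PySem.Chars.find (t.drop (i + 1)) w := by
      have := PySem.Chars.neg_one_le_find (t.drop (i + 1)) w; omega
    have hfspec := PySem.Chars.find_spec hfnn
    set f := PySem.Chars.find (t.drop (i + 1)) w with hf
    have hhit : w <+: (t.drop i).drop (1 + f.toNat) := by rw [← hdrop]; exact hfspec.1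
    have hgnn : 0 ≤ PySem.Chars.find (t.drop i) w := by
      rw [PySem.Chars.find_nonneg_iff]
      exact (PySem.Chars.isIn_iff_infix w (t.drop i)).1
        ((PySem.Chars.exists_prefix_drop_iff_isIn w (t.drop i)).1 ⟨1 + f.toNat, hhit⟩)
    have hgspec := PySem.Chars.find_spec hgnn
    set g := PySem.Chars.find (t.drop i) w with hg
    have hgle : g.toNat ≤ 1 + f.toNat := by
      by_contra hlt
      exact hgspec.2 (1 + f.toNat) (by omega) hhit
    have hgne : g.toNat ≠ 0 := by
      intro h00
      exact h (by simpa [h00] using hgspec.1)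
    have hge : 1 + f.toNat ≤ g.toNat := by
      by_contra hlt
      obtain ⟨k, hk⟩ : ∃ k, g.toNat = 1 + k := ⟨g.toNat - 1, by omega⟩
      have hhit' : w <+: (t.drop (i + 1)).drop k := by rw [hdrop]; simpa [hk] using hgspec.1
      exact hfspec.2 k (by omega) hhit'
    have hgeq : g = 1 + f := by omega
    have hgne1 : g ≠ -1 := by omega
    have hfne1 : f ≠ -1 := by omega
    rw [if_neg hgne1, if_neg hfne1, hgeq]
    push_cast; ring

-- both loops return unchanged once the index reaches the end
theorem goA_stop (t w : List Char) (n : Nat) (i : Nat) (acc : List Int)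
    (hi : t.length ≤ i) : goA t w n (i : Int) acc = acc := by
  cases n with
  | zero => rfl
  | succ m => simp [goA, show ¬((i : Int) < (t.length : Int)) by exact_mod_cast not_lt.2 hi]

theorem scanC_stop (t w : List Char) (n : Nat) (i : Nat) (acc : List Int)
    (hi : t.length ≤ i) : scanC t w n i acc = acc := by
  cases n with
  | zero => rfl
  | succ m => simp [scanC, not_lt.2 hi]

-- with a nonempty pattern the result of A's loop does not depend on a sufficient fuel
theorem goA_fuel (t w : List Char) (hw : w ≠ []) :
    ∀ (n m : Nat) (i : Nat) (acc : List Int), t.length ≤ i + n → t.length ≤ i + m →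
      goA t w n (i : Int) acc = goA t w m (i : Int) acc := by
  intro n
  induction n with
  | zero =>
    intro m i acc hn hm
    rw [goA_stop t w 0 i acc (by omega), goA_stop t w m i acc (by omega)]
  | succ n ih =>
    intro m i acc hn hm
    cases m with
    | zero =>
      rw [goA_stop t w (n+1) i acc (by omega), goA_stop t w 0 i acc (by omega)]
    | succ m =>
      by_cases hi : i < t.length
      · have hguard : (i : Int) < (t.length : Int) := by exact_mod_cast hi
        simp only [goA, if_pos hguard]
        set j := PySem.Chars.findFrom t w (i : Int) none with hj
        by_cases hj1 : j = -1
        · simp [hj1]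
        · have hsp := PySem.Chars.findFrom_natCast_spec t w i (le_of_lt hi) (by simpa [hj] using hj1)
          have hij : (i : Int) ≤ j := hsp.1
          have hjcast : j + (w.length : Int) = ((j.toNat + w.length : Nat) : Int) := by
            push_cast; omega
          have hwpos : 0 < w.length := List.length_pos_iff.2 hw
          have hjn : i ≤ j.toNat := by omega
          simp only [if_neg hj1, hjcast]
          exact ih m (j.toNat + w.length) (acc ++ [j]) (by omega) (by omega)
      · rw [goA_stop t w (n+1) i acc (by omega), goA_stop t w (m+1) i acc (by omega)]

-- A's find-driven loop equals the naive scan (with a nonempty pattern and enough fuel)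
theorem goA_eq_scanC (t w : List Char) (hw : w ≠ []) :
    ∀ (n : Nat) (i : Nat) (acc : List Int), t.length ≤ i + n →
      goA t w n (i : Int) acc = scanC t w n i acc := by
  intro n
  induction n with
  | zero =>
    intro i acc hn
    rw [goA_stop t w 0 i acc (by omega)]; rfl
  | succ n ih =>
    intro i acc hn
    by_cases hi : i < t.length
    · have hguard : (i : Int) < (t.length : Int) := by exact_mod_cast hi
      have hwpos : 0 < w.length := List.length_pos_iff.2 hw
      by_cases hp : w <+: t.drop i
      · -- a match at i: both append i and skip len(word)
        have hself := findFrom_self t w i (le_of_lt hi) hp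
        have hne : PySem.Chars.findFrom t w (i : Int) none ≠ -1 := by rw [hself]; omega
        simp only [goA, scanC, if_pos hguard, if_pos hi,
          if_pos ((PySem.Chars.startswith_iff _ _).2 hp), hself]
        have hc : (i : Int) + (w.length : Int) = ((i + w.length : Nat) : Int) := by push_cast; ring
        rw [hc]
        exact ih (i + w.length) (acc ++ [(i : Int)]) (by omega)
      · -- no match at i: the scan advances by one; A's find skips i as well
        have hstep := findFrom_step t w i hi hp
        have hAB : goA t w (n+1) (i : Int) acc = goA t w (n+1) ((i+1 : Nat) : Int) acc := by
          by_cases hi1 : i + 1 < t.length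
          · have hguard1 : ((i+1 : Nat) : Int) < (t.length : Int) := by exact_mod_cast hi1
            simp only [goA, if_pos hguard, if_pos hguard1, hstep]
          · have hend : t.drop (i+1) = [] := List.drop_eq_nil_of_le (by omega)
            have hmiss : PySem.Chars.findFrom t w (i : Int) none = -1 := by
              rw [hstep, PySem.Chars.findFrom_natCast t w (i+1) hi, hend,
                find_nil_of_ne w hw]
              simp
            rw [goA_stop t w (n+1) (i+1) acc (by omega)]
            simp [goA, hmiss]
        rw [hAB]
        rw [goA_fuel t w hw (n+1) n (i+1) acc (by omega) (by omega)]
        rw [ih (i+1) acc (by omega)]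
        simp only [scanC, if_pos hi, if_neg (fun hs => hp ((PySem.Chars.startswith_iff _ _).1 hs))]
    · rw [goA_stop t w (n+1) i acc (by omega), scanC_stop t w (n+1) i acc (by omega)]

-- the hit positions of B's first pass that are ≥ i (ffilter P n 0 is that pass itself)
def ffilter (P : Nat → Bool) (n i : Nat) : List Nat :=
  (List.range n).filter (fun j => decide (i ≤ j) && P j)

theorem ffilter_zero (P : Nat → Bool) (n : Nat) :
    ffilter P n 0 = (List.range n).filter P := by
  unfold ffilter
  exact List.filter_congr (by intro j _; simp)

theorem ffilter_nil (P : Nat → Bool) (n i : Nat) (h : n ≤ i) : ffilter P n i = [] := by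
  unfold ffilter
  rw [List.filter_eq_nil_iff]
  intro j hj
  have : j < n := List.mem_range.1 hj
  simp only [Bool.and_eq_true, decide_eq_true_eq]
  omega

theorem mem_ffilter_le (P : Nat → Bool) (n i p : Nat) (h : p ∈ ffilter P n i) : i ≤ p := by
  unfold ffilter at h
  have hp := (List.mem_filter.1 h).2
  simp only [Bool.and_eq_true, decide_eq_true_eq] at hp
  exact hp.1

-- peeling index i off the list of hits from i on
theorem ffilter_decomp (P : Nat → Bool) :
    ∀ (n i : Nat), i < n →
      ffilter P n i = if P i then i :: ffilter P n (i+1) else ffilter P n (i+1) := by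
  intro n
  induction n with
  | zero => intro i hi; omega
  | succ n ih =>
    intro i hi
    have hsplit : ∀ k : Nat, ffilter P (n+1) k =
        ffilter P n k ++ (if k ≤ n ∧ P n = true then [n] else []) := by
      intro k
      unfold ffilter
      rw [List.range_succ, List.filter_append]
      congr 1
      by_cases h1 : k ≤ n <;> by_cases h2 : P n <;> simp [h1, h2]
    by_cases hin : i < n
    · rw [hsplit i, hsplit (i+1), ih i hin]
      by_cases hPi : P i
      · simp [hPi, show i ≤ n by omega, show i + 1 ≤ n by omega]
      · simp [hPi, show i ≤ n by omega, show i + 1 ≤ n by omega]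
    · have hieq : i = n := by omega
      rw [hieq, hsplit n, hsplit (n+1), ffilter_nil P n n le_rfl,
        ffilter_nil P n (n+1) (by omega)]
      by_cases hPi : P n
      · simp [hPi, show ¬ (n + 1 ≤ n) by omega]
      · simp [hPi, show ¬ (n + 1 ≤ n) by omega]

-- the greedy pass ignores which of two small enough bounds it carries
theorem goGreedy_bound (m : Nat) (l : List Nat) (b1 b2 : Nat) (acc : List Int)
    (h1 : ∀ p ∈ l, b1 ≤ p) (h2 : ∀ p ∈ l, b2 ≤ p) :
    goGreedy m l b1 acc = goGreedy m l b2 acc := by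
  cases l with
  | nil => rfl
  | cons p rest =>
    simp only [goGreedy,
      if_pos (h1 p (List.mem_cons_self)), if_pos (h2 p (List.mem_cons_self))]

-- hits below the bound are skipped: starting the hit list at i or at k ≥ i is the same
theorem goGreedy_skip (P : Nat → Bool) (m n : Nat) :
    ∀ (d i k : Nat) (acc : List Int), k - i ≤ d → i ≤ k →
      goGreedy m (ffilter P n i) k acc = goGreedy m (ffilter P n k) k acc := by
  intro d
  induction d with
  | zero =>
    intro i k acc hd hik
    have : i = k := by omega
    rw [this]
  | succ d ih =>
    intro i k acc hd hik
    by_cases hik' : i = k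
    · rw [hik']
    · have hlt : i < k := by omega
      by_cases hin : i < n
      · rw [ffilter_decomp P n i hin]
        by_cases hPi : P i
        · rw [if_pos hPi]
          simp only [goGreedy, if_neg (by omega : ¬ k ≤ i)]
          exact ih (i+1) k acc (by omega) (by omega)
        · rw [if_neg hPi]
          exact ih (i+1) k acc (by omega) (by omega)
      · rw [ffilter_nil P n i (by omega)]
        by_cases hkn : k < n
        · rw [ffilter_nil P n k (by omega)]
        · rw [ffilter_nil P n k (by omega)]

-- the naive scan equals the greedy pass over the remaining hits
theorem scanC_eq_greedy (t w : List Char) (hw : w ≠ []) :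
    ∀ (fuel i : Nat) (acc : List Int), t.length ≤ i + fuel →
      scanC t w fuel i acc =
        goGreedy w.length (ffilter (fun j => (t.drop j).take w.length == w) t.length i) i acc := by
  intro fuel
  induction fuel with
  | zero =>
    intro i acc hfi
    rw [scanC_stop t w 0 i acc (by omega),
      ffilter_nil _ t.length i (by omega)]
    rfl
  | succ fuel ih =>
    intro i acc hfi
    by_cases hi : i < t.length
    · have hwpos : 0 < w.length := List.length_pos_iff.2 hw
      rw [ffilter_decomp _ t.length i hi]
      by_cases hp : w <+: t.drop i
      · have hPi : ((t.drop i).take w.length == w) = true := by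
          rw [beq_iff_eq]
          exact (List.prefix_iff_eq_take.1 hp).symm
        rw [if_pos hPi]
        simp only [scanC, if_pos hi, if_pos ((PySem.Chars.startswith_iff _ _).2 hp),
          goGreedy, if_pos (le_refl i)]
        rw [ih (i + w.length) (acc ++ [(i : Int)]) (by omega)]
        exact (goGreedy_skip (fun j => (t.drop j).take w.length == w) w.length t.length
          w.length (i+1) (i+w.length) (acc ++ [(i : Int)]) (by omega) (by omega)).symm
      · have hPi : ¬ ((t.drop i).take w.length == w) = true := by
          rw [beq_iff_eq]
          intro he
          exact hp (List.prefix_iff_eq_take.2 he.symm)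
        rw [if_neg hPi]
        simp only [scanC, if_pos hi,
          if_neg (fun hs => hp ((PySem.Chars.startswith_iff _ _).1 hs))]
        rw [ih (i+1) acc (by omega)]
        exact goGreedy_bound w.length
          (ffilter (fun j => (t.drop j).take w.length == w) t.length (i+1)) (i+1) i acc
          (fun p hp' => mem_ffilter_le _ _ _ _ hp')
          (fun p hp' => by have := mem_ffilter_le _ _ _ _ hp'; omega)
    · rw [scanC_stop t w (fuel+1) i acc (by omega),
        ffilter_nil _ t.length i (by omega)]
      rfl

-- ===== VERDICT (by name: the statement is the Claim_ definition above) =====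
theorem find_word_occurrences_spec : Claim_equal_find_word_occurrences := by
  intro text word _hdom hpre
  unfold Spec_find_word_occurrences find_word_occurrences find_word_occurrences_alt
  rcases hpre with hw | ht
  · have hw' : PySem.Chars.lower word.toList ≠ [] := by
      simpa [PySem.Chars.lower] using hw
    set t := PySem.Chars.lower text.toList with hT
    set w := PySem.Chars.lower word.toList with hW
    have h1 := goA_eq_scanC t w hw' (t.length + 1) 0 [] (by omega)
    have h2 := scanC_eq_greedy t w hw' (t.length + 1) 0 [] (by omega)
    rw [show (0 : Int) = ((0 : Nat) : Int) from rfl, h1, h2, ffilter_zero]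
  · simp [ht, goA, goGreedy, PySem.Chars.lower]
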